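-- pv_equiv track=rewrite | github.com/Syrko/Lempel_Ziv_77 | Assignment.py | get_longest_match_ref
-- ===== SOURCE A (Python) =====
-- def get_longest_match_ref(search_buffer_value, lookahead_buffer_value):
--     # Find longest matching substring in window
--     window = str(search_buffer_value) + str(lookahead_buffer_value)
--     ref_list = [(0, 0)]
--     for i in range(len(search_buffer_value)):
--         for j in range(len(lookahead_buffer_value), 0, -1):
--             if lookahead_buffer_value.find(window[i: i+j]) > -1:
--                 ref_list.append((i, j))
--     ref_list.sort(key=lambda tup: tup[1], reverse=True)
--     # return tuple of (index, length) with the greatest length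
--     return ref_list[0]
-- ===== SOURCE B (Python) =====
-- def get_longest_match_ref(search_buffer_value, lookahead_buffer_value):
--     # Greedy best-match scan: extend the current best length at each start
--     # position instead of enumerating and sorting all matches.
--     window = str(search_buffer_value) + str(lookahead_buffer_value)
--     L = len(lookahead_buffer_value)
--     best_idx = 0
--     best_len = 0
--     for i in range(len(search_buffer_value)):
--         while best_len < L and window[i: i + best_len + 1] in lookahead_buffer_value:
--             best_len += 1
--             best_idx = i
--     return (best_idx, best_len)
-- ===== Notes on version B (the rewrite author's own statement) =====
-- stated objective: faster
-- what changed: Replaces the enumerate-all-(i,j)-pairs-then-stable-sort scheme by a single greedy scan that only ever tests extending the current best length by one character, keeping the earliest start index of the maximum-length match.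
import Mathlib
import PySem

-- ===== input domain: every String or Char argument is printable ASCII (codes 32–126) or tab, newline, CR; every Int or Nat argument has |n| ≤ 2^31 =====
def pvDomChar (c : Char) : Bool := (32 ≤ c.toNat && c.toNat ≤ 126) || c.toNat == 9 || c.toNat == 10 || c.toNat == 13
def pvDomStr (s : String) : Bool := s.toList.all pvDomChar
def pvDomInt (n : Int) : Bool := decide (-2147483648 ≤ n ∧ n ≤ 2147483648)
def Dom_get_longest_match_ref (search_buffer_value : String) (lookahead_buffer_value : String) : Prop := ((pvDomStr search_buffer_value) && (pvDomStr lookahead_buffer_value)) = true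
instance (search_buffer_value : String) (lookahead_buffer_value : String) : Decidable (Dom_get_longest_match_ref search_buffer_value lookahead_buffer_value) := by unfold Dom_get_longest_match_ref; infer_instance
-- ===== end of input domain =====

-- B replaces A's enumerate-all-matches-then-stable-sort by a single greedy scan
-- that only tries to extend the current best match length by one character
-- (objective: faster, measured).

-- ===== PORT A =====
-- Python returns the tuple ref_list[0] = (index, length); under the fixed return
-- type List Int it is delivered as the two-element list [index, length].
def get_longest_match_ref (search_buffer_value : String) (lookahead_buffer_value : String) : List Int :=
  let s := search_buffer_value.toList
  let look := lookahead_buffer_value.toList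
  -- window = str(search_buffer_value) + str(lookahead_buffer_value)  (str of a str is itself)
  let window := s ++ look
  let refList : List (Int × Int) :=
    (PySem.List.pyRange 0 (s.length : Int) 1).foldl (fun acc i =>
      (PySem.List.pyRange (look.length : Int) 0 (-1)).foldl (fun acc2 j =>
        if PySem.Chars.find look (PySem.List.slice window (some i) (some (i + j))) > -1
        then acc2 ++ [(i, j)]
        else acc2) acc) [(0, 0)]
  let sortedList := PySem.List.sorted refList (fun tup => tup.2) true
  match PySem.List.pyGet? sortedList 0 with
  | some p => [p.1, p.2]
  | none => []   -- unreachable: ref_list starts with (0,0), so it is never empty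

-- ===== PORT B =====
-- the 'while best_len < L and window[i:i+best_len+1] in lookahead' loop of Source B;
-- fuel L bounds its iterations (best_len < L on every pass)
def altWhile (window look : List Char) (L : Nat) (i : Int) : Nat → (Int × Int) → (Int × Int)
  | 0, st => st
  | fuel + 1, (best_idx, best_len) =>
    if best_len < (L : Int) ∧
       PySem.Chars.isIn (PySem.List.slice window (some i) (some (i + best_len + 1))) look
    then altWhile window look L i fuel (i, best_len + 1)
    else (best_idx, best_len)

def get_longest_match_ref_alt (search_buffer_value : String) (lookahead_buffer_value : String) : List Int :=
  let s := search_buffer_value.toList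
  let look := lookahead_buffer_value.toList
  let window := s ++ look
  let L := look.length
  let st := (PySem.List.pyRange 0 (s.length : Int) 1).foldl
    (fun st i => altWhile window look L i L st) (0, 0)
  [st.1, st.2]

-- ===== PRECONDITION & SPEC =====
def Spec_get_longest_match_ref (search_buffer_value : String) (lookahead_buffer_value : String) (out : List Int) : Prop := out = get_longest_match_ref_alt search_buffer_value lookahead_buffer_value
instance (search_buffer_value : String) (lookahead_buffer_value : String) (out : List Int) : Decidable (Spec_get_longest_match_ref search_buffer_value lookahead_buffer_value out) := by unfold Spec_get_longest_match_ref; infer_instance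

-- ===== CLAIM (what is proved, stated in full; the proofs are below) =====
def Claim_equal_get_longest_match_ref : Prop := ∀ (search_buffer_value : String) (lookahead_buffer_value : String), Dom_get_longest_match_ref search_buffer_value lookahead_buffer_value → Spec_get_longest_match_ref search_buffer_value lookahead_buffer_value (get_longest_match_ref search_buffer_value lookahead_buffer_value)

-- ===== LEMMAS AND PROOFS =====

-- the candidate match of length j starting at i in the window
def pvT (s look : List Char) (i j : Nat) : List Char := (List.drop i (s ++ look)).take j

-- longest j ≤ len(look) such that the window slice [i, i+j) occurs in look
def pvF (s look : List Char) (i : Nat) : Nat :=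
  Nat.findGreatest (fun j => pvT s look i j <:+: look) look.length

-- "keep the first maximum" step (what the head of a stable reverse sort computes)
def pvG (h x : Int × Int) : Int × Int := if h.2 < x.2 then x else h

def pvGO (o : Option (Int × Int)) (x : Int × Int) : Option (Int × Int) :=
  match o with
  | none => some x
  | some h => some (pvG h x)

-- the common Nat-level reference fold both ports compute
def pvStep (s look : List Char) (st : Nat × Nat) (i : Nat) : Nat × Nat :=
  if st.2 < pvF s look i then (i, pvF s look i) else st

def pvCast (p : Nat × Nat) : Int × Int := ((p.1 : Int), (p.2 : Int))

-- the Bool predicate A's inner loop filters with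
def pvB (s look : List Char) (i : Nat) (j : Int) : Bool :=
  decide (PySem.Chars.find look
    (PySem.List.slice (s ++ look) (some (i : Int)) (some ((i : Int) + j))) > -1)

lemma pvT_mono {s look : List Char} {i j' j : Nat} (h : j' ≤ j)
    (hj : pvT s look i j <:+: look) : pvT s look i j' <:+: look := by
  have he : pvT s look i j' = (pvT s look i j).take j' := by
    simp [pvT, List.take_take, Nat.min_eq_left h]
  rw [he]
  exact (List.take_prefix _ _).isInfix.trans hj

lemma pvF_spec (s look : List Char) (i : Nat) : pvT s look i (pvF s look i) <:+: look := by
  have h0 : pvT s look i 0 <:+: look := by simp [pvT]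
  unfold pvF
  exact Nat.findGreatest_spec (P := fun j => pvT s look i j <:+: look) (Nat.zero_le _) h0

lemma pv_valid_iff {s look : List Char} {i j : Nat} (hj : j ≤ look.length) :
    (pvT s look i j <:+: look) ↔ j ≤ pvF s look i := by
  constructor
  · intro h; exact Nat.le_findGreatest hj h
  · intro h; exact pvT_mono h (pvF_spec s look i)

lemma pvF_le (s look : List Char) (i : Nat) : pvF s look i ≤ look.length :=
  Nat.findGreatest_le _

-- descending range(m, 0, -1) as a map over List.range
lemma pv_pyRange_desc (n : Nat) :
    PySem.List.pyRange (n : Int) 0 (-1)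
      = (List.range n).map (fun k : Nat => (n : Int) - (k : Int)) := by
  unfold PySem.List.pyRange
  rcases Nat.eq_zero_or_pos n with rfl | h
  · simp
  · have h0 : (0 : Int) < n := by exact_mod_cast h
    simp only [if_neg (by norm_num : ¬ (-1 : Int) = 0), if_neg (by norm_num : ¬ (0:Int) < -1),
      if_pos h0]
    have hc : ((n : Int) - 0 + - -1 - 1) / - -1 = (n : Int) := by norm_num
    rw [hc, Int.toNat_natCast]
    exact List.map_congr_left (fun k _ => by ring)

lemma pv_pyRange_desc_succ (m : Nat) :
    PySem.List.pyRange ((m : Int) + 1) 0 (-1) =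
      ((m : Int) + 1) :: PySem.List.pyRange (m : Int) 0 (-1) := by
  have h1 : ((m : Int) + 1) = ((m + 1 : Nat) : Int) := by push_cast; ring
  rw [h1, pv_pyRange_desc, pv_pyRange_desc, List.range_succ_eq_map, List.map_cons, List.map_map]
  refine congrArg₂ _ (by push_cast; ring) (List.map_congr_left fun k _ => ?_)
  simp only [Function.comp, Nat.succ_eq_add_one]
  push_cast
  ring

lemma pv_mem_pyRange_desc {n : Nat} {j : Int} (h : j ∈ PySem.List.pyRange (n : Int) 0 (-1)) :
    j ≤ (n : Int) := by
  rw [pv_pyRange_desc] at h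
  obtain ⟨k, -, rfl⟩ := List.mem_map.1 h
  omega

lemma pv_noUpdate : ∀ (lst : List (Int × Int)) (st : Int × Int),
    (∀ p ∈ lst, p.2 ≤ st.2) → List.foldl pvG st lst = st := by
  intro lst
  induction lst with
  | nil => intro st _; rfl
  | cons p t ih =>
    intro st h
    have hp : p.2 ≤ st.2 := h p (List.mem_cons_self ..)
    have hG : pvG st p = st := by simp [pvG, not_lt.2 hp]
    simp only [List.foldl_cons, hG]
    exact ih st (fun q hq => h q (List.mem_cons_of_mem _ hq))

lemma pvB_natCast (s look : List Char) (i j : Nat) :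
    pvB s look i (j : Int) = decide (pvT s look i j <:+: look) := by
  have hs : PySem.List.slice (s ++ look) (some (i : Int)) (some ((i : Int) + (j : Int)))
      = pvT s look i j := by
    simpa [pvT] using PySem.List.slice_natCast_add (s ++ look) i j
  simp only [pvB]
  rw [hs]
  apply decide_eq_decide.2
  have h := PySem.Chars.find_nonneg_iff look (pvT s look i j)
  refine ⟨fun hgt => h.1 (by omega), fun hi => ?_⟩
  have := h.2 hi
  omega

-- A's inner j-loop, filtered and folded with pvG, performs one pvStep
lemma pv_innerA (s look : List Char) (i : Nat) :
    ∀ (m : Nat) (st : Int × Int), pvF s look i ≤ m → m ≤ look.length → 0 ≤ st.2 →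
      List.foldl pvG st
        (((PySem.List.pyRange (m : Int) 0 (-1)).filter (pvB s look i)).map
          (fun j => ((i : Int), j)))
      = (if st.2 < (pvF s look i : Int) then ((i : Int), (pvF s look i : Int)) else st) := by
  intro m
  induction m with
  | zero =>
    intro st hf _ hst
    have hf0 : pvF s look i = 0 := Nat.le_zero.1 hf
    have hlt : ¬ st.2 < (pvF s look i : Int) := by rw [hf0]; push_cast; omega
    simp [hlt, show PySem.List.pyRange (0 : Int) 0 (-1) = [] from rfl]
  | succ m ih =>
    intro st hf hm hst
    have hb_eq : pvB s look i ((m : Int) + 1) = decide (pvT s look i (m + 1) <:+: look) := by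
      rw [show ((m : Int) + 1) = ((m + 1 : Nat) : Int) by push_cast; ring, pvB_natCast]
    push_cast
    rw [pv_pyRange_desc_succ]
    by_cases hv : pvT s look i (m + 1) <:+: look
    · -- head j = m+1 is valid, so pvF = m+1 and the rest of the list never updates
      have hle : m + 1 ≤ pvF s look i := (pv_valid_iff hm).1 hv
      have hfe : pvF s look i = m + 1 := le_antisymm hf hle
      rw [List.filter_cons_of_pos (by rw [hb_eq]; exact decide_eq_true hv),
        List.map_cons, List.foldl_cons]
      have hx : (m : Int) + 1 ≤ (pvG st ((i : Int), (m : Int) + 1)).2 := by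
        by_cases hlt : st.2 < (m : Int) + 1
        · simp [pvG, hlt]
        · simp only [pvG, if_neg hlt]; omega
      rw [pv_noUpdate]
      · rw [hfe]; push_cast
        by_cases hlt : st.2 < (m : Int) + 1
        · simp [pvG, hlt]
        · simp [pvG, hlt]
      · intro p hp
        obtain ⟨j, hj, rfl⟩ := List.mem_map.1 hp
        have hj' : j ≤ (m : Int) := pv_mem_pyRange_desc (List.mem_of_mem_filter hj)
        simpa using le_trans (show j ≤ (m : Int) + 1 by omega) hx
    · -- head j = m+1 is filtered out, and pvF ≤ m
      rw [List.filter_cons_of_neg (by rw [hb_eq]; simpa using hv)]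
      have hfm : pvF s look i ≤ m := by
        by_contra hgt
        exact hv ((pv_valid_iff (show m + 1 ≤ look.length by omega)).2 (by omega))
      exact ih st hfm (by omega) hst

-- folding pvGO from a some-state is folding pvG
lemma pv_foldl_some : ∀ (xs : List (Int × Int)) (st : Int × Int),
    List.foldl pvGO (some st) xs = some (List.foldl pvG st xs) := by
  intro xs
  induction xs with
  | nil => intro st; rfl
  | cons x t ih => intro st; simp only [List.foldl_cons, pvGO]; exact ih _

lemma pv_foldl_some_nested (g : Nat → List (Int × Int)) :
    ∀ (ks : List Nat) (st : Int × Int),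
      List.foldl (fun o k => List.foldl pvGO o (g k)) (some st) ks
        = some (List.foldl (fun st k => List.foldl pvG st (g k)) st ks) := by
  intro ks
  induction ks with
  | nil => intro st; rfl
  | cons k t ih => intro st; simp only [List.foldl_cons, pv_foldl_some]; exact ih _

-- head of the stable reverse insertion sort = "first maximum" fold
lemma pv_head_insertBy (x : Int × Int) (acc : List (Int × Int)) :
    (PySem.List.insertBy (fun a b => decide (b.2 < a.2)) x acc).head? = pvGO acc.head? x := by
  cases acc with
  | nil => simp [PySem.List.insertBy, pvGO]
  | cons h t =>
    by_cases hc : h.2 < x.2 <;> simp [PySem.List.insertBy, hc, pvGO, pvG]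

lemma pv_head_sorted (xs : List (Int × Int)) :
    (PySem.List.sorted xs (fun tup => tup.2) true).head? = xs.foldl pvGO none := by
  rw [PySem.List.sorted_rev_eq_foldl_insertBy]
  suffices h : ∀ acc : List (Int × Int),
      (xs.foldl (fun acc x => PySem.List.insertBy (fun a b => decide (b.2 < a.2)) x acc) acc).head?
        = xs.foldl pvGO acc.head? by
    simpa using h []
  induction xs with
  | nil => intro acc; rfl
  | cons x t ih =>
    intro acc
    simp only [List.foldl_cons]
    rw [ih, pv_head_insertBy]

-- A's outer fold over the start indices = the reference fold
lemma pv_outerA (s look : List Char) : ∀ (ks : List Nat) (st : Nat × Nat),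
    List.foldl (fun st (k : Nat) =>
        List.foldl pvG st
          (((PySem.List.pyRange (look.length : Int) 0 (-1)).filter (pvB s look k)).map
            (fun j => ((k : Int), j))))
      (pvCast st) ks
    = pvCast (ks.foldl (pvStep s look) st) := by
  intro ks
  induction ks with
  | nil => intro st; rfl
  | cons k t ih =>
    intro st
    simp only [List.foldl_cons]
    rw [pv_innerA s look k look.length (pvCast st) (pvF_le s look k) le_rfl (by simp [pvCast])]
    have hsplit : (if (pvCast st).2 < (pvF s look k : Int)
        then ((k : Int), (pvF s look k : Int)) else pvCast st) = pvCast (pvStep s look st k) := by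
      by_cases hlt : st.2 < pvF s look k <;> simp [pvStep, pvCast, hlt, Nat.cast_lt]
    rw [hsplit, ih]

-- B's while loop climbs exactly to the per-start longest length pvF
lemma pv_while (s look : List Char) (i : Nat) :
    ∀ (fuel : Nat) (bi : Int) (n : Nat), look.length ≤ n + fuel →
      altWhile (s ++ look) look look.length (i : Int) fuel (bi, (n : Int))
        = (if n < pvF s look i then ((i : Int), (pvF s look i : Int)) else (bi, (n : Int))) := by
  intro fuel
  induction fuel with
  | zero =>
    intro bi n hL
    have hlt : ¬ n < pvF s look i := by have := pvF_le s look i; omega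
    simp [altWhile, hlt]
  | succ fuel ih =>
    intro bi n hL
    have hslice : PySem.List.slice (s ++ look) (some (i : Int)) (some ((i : Int) + (n : Int) + 1))
        = pvT s look i (n + 1) := by
      have he : ((i : Int) + (n : Int) + 1) = ((i : Int) + ((n + 1 : Nat) : Int)) := by
        push_cast; ring
      rw [he]
      simpa [pvT] using PySem.List.slice_natCast_add (s ++ look) i (n + 1)
    by_cases hn1 : n + 1 ≤ pvF s look i
    · have hcond : ((n : Int) < (look.length : Int) ∧
          PySem.Chars.isIn (PySem.List.slice (s ++ look) (some (i : Int))
            (some ((i : Int) + (n : Int) + 1))) look = true) := by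
        refine ⟨by have := pvF_le s look i; omega, ?_⟩
        rw [hslice, PySem.Chars.isIn_iff_infix]
        exact (pv_valid_iff (show n + 1 ≤ look.length by have := pvF_le s look i; omega)).2 hn1
      simp only [altWhile, if_pos hcond]
      have he : ((n : Int) + 1) = ((n + 1 : Nat) : Int) := by push_cast; ring
      rw [he, ih i (n + 1) (by omega)]
      by_cases hlt : n + 1 < pvF s look i
      · rw [if_pos hlt, if_pos (by omega)]
      · have hfe : pvF s look i = n + 1 := by omega
        rw [if_neg hlt, if_pos (by omega), hfe]
    · have hcond : ¬ ((n : Int) < (look.length : Int) ∧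
          PySem.Chars.isIn (PySem.List.slice (s ++ look) (some (i : Int))
            (some ((i : Int) + (n : Int) + 1))) look = true) := by
        rintro ⟨h1, h2⟩
        rw [hslice, PySem.Chars.isIn_iff_infix] at h2
        exact hn1 ((pv_valid_iff (show n + 1 ≤ look.length by omega)).1 h2)
      simp only [altWhile, if_neg hcond]
      rw [if_neg (by omega)]

-- B's outer fold = the reference fold
lemma pv_outerB (s look : List Char) : ∀ (ks : List Nat) (st : Nat × Nat),
    List.foldl (fun st (k : Nat) =>
        altWhile (s ++ look) look look.length (k : Int) look.length st)
      (pvCast st) ks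
    = pvCast (ks.foldl (pvStep s look) st) := by
  intro ks
  induction ks with
  | nil => intro st; rfl
  | cons k t ih =>
    intro st
    simp only [List.foldl_cons]
    rw [show pvCast st = ((st.1 : Int), (st.2 : Int)) from rfl,
      pv_while s look k look.length st.1 st.2 (by omega)]
    have hsplit : (if st.2 < pvF s look k then ((k : Int), (pvF s look k : Int))
        else ((st.1 : Int), (st.2 : Int))) = pvCast (pvStep s look st k) := by
      by_cases hlt : st.2 < pvF s look k <;> simp [pvStep, pvCast, hlt]
    rw [hsplit, ih]

-- A computes the reference fold
lemma pv_A_eq (sb lb : String) :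
    get_longest_match_ref sb lb =
      [(pvCast ((List.range sb.toList.length).foldl (pvStep sb.toList lb.toList) (0, 0))).1,
       (pvCast ((List.range sb.toList.length).foldl (pvStep sb.toList lb.toList) (0, 0))).2] := by
  simp only [get_longest_match_ref]
  rw [PySem.List.pyRange_zero_natCast, List.foldl_map]
  have hfun : (fun (acc : List (Int × Int)) (k : Nat) =>
      (PySem.List.pyRange (lb.toList.length : Int) 0 (-1)).foldl (fun acc2 j =>
        if PySem.Chars.find lb.toList
            (PySem.List.slice (sb.toList ++ lb.toList) (some (k : Int)) (some ((k : Int) + j))) > -1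
        then acc2 ++ [((k : Int), j)] else acc2) acc)
      = (fun acc k => acc ++
          (((PySem.List.pyRange (lb.toList.length : Int) 0 (-1)).filter (pvB sb.toList lb.toList k)).map
            (fun j => ((k : Int), j)))) := by
    funext acc k
    rw [show (fun (acc2 : List (Int × Int)) (j : Int) =>
        if PySem.Chars.find lb.toList
            (PySem.List.slice (sb.toList ++ lb.toList) (some (k : Int)) (some ((k : Int) + j))) > -1
        then acc2 ++ [((k : Int), j)] else acc2)
        = (fun (acc2 : List (Int × Int)) (j : Int) =>
            if pvB sb.toList lb.toList k j = true then acc2 ++ [((k : Int), j)] else acc2) from by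
      funext acc2 j
      simp [pvB]]
    exact PySem.List.foldl_append_if _ _ _ _
  rw [hfun, PySem.List.foldl_append_eq_flatMap]
  rw [PySem.List.pyGet?_zero, ← List.head?_eq_getElem?]
  rw [pv_head_sorted, List.singleton_append, List.foldl_cons]
  rw [show pvGO none ((0 : Int), (0 : Int)) = some ((0 : Int), (0 : Int)) from rfl]
  rw [List.foldl_flatMap]
  rw [show ((0 : Int), (0 : Int)) = pvCast (0, 0) from rfl]
  rw [pv_foldl_some_nested, pv_outerA]

-- B computes the reference fold
lemma pv_B_eq (sb lb : String) :
    get_longest_match_ref_alt sb lb =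
      [(pvCast ((List.range sb.toList.length).foldl (pvStep sb.toList lb.toList) (0, 0))).1,
       (pvCast ((List.range sb.toList.length).foldl (pvStep sb.toList lb.toList) (0, 0))).2] := by
  simp only [get_longest_match_ref_alt]
  rw [PySem.List.pyRange_zero_natCast, List.foldl_map]
  rw [show ((0 : Int), (0 : Int)) = pvCast (0, 0) from rfl]
  rw [pv_outerB]

-- ===== VERDICT (by name: the statement is the Claim_ definition above) =====
theorem get_longest_match_ref_spec : Claim_equal_get_longest_match_ref := by
  intro sb lb _
  unfold Spec_get_longest_match_ref
  exact (pv_A_eq sb lb).trans (pv_B_eq sb lb).symm
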